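-- pv_equiv track=rewrite | github.com/AlessioDiaz0/Translated_Project | solution/services/stammering_service.py | _count_max_consecutive_any
-- ===== SOURCE A (Python) =====
-- from typing import List, Tuple
--
-- def _count_max_consecutive_any(ngrams: List[Tuple[str, ...]]) -> int:
--     """Count maximum consecutive occurrences of ANY ngram."""
--     if not ngrams:
--         return 0
--
--     max_count = 1
--     current_count = 1
--     prev_ngram = ngrams[0]
--
--     for ngram in ngrams[1:]:
--         if ngram == prev_ngram:
--             current_count += 1
--             max_count = max(max_count, current_count)
--         else:
--             current_count = 1
--             prev_ngram = ngram
--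
--     return max_count
-- ===== SOURCE B (Python) =====
-- from typing import List, Tuple
--
-- def _count_max_consecutive_any(ngrams: List[Tuple[str, ...]]) -> int:
--     """Decompose the list into maximal runs of equal ngrams, collect the run
--     lengths, then reduce with max (default 0 for the empty list)."""
--     run_lengths = []
--     i = 0
--     n = len(ngrams)
--     while i < n:
--         j = i + 1
--         while j < n and ngrams[j] == ngrams[i]:
--             j += 1
--         run_lengths.append(j - i)
--         i = j
--     return max(run_lengths, default=0)
-- ===== Notes on version B (the rewrite author's own statement) =====
-- stated objective: alternative
-- what changed: B replaces A's prev/current/max counter state machine by a run-decomposition: it splits the list into maximal runs of equal ngrams, collects their lengths, and reduces with max (default 0).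
import Mathlib
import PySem

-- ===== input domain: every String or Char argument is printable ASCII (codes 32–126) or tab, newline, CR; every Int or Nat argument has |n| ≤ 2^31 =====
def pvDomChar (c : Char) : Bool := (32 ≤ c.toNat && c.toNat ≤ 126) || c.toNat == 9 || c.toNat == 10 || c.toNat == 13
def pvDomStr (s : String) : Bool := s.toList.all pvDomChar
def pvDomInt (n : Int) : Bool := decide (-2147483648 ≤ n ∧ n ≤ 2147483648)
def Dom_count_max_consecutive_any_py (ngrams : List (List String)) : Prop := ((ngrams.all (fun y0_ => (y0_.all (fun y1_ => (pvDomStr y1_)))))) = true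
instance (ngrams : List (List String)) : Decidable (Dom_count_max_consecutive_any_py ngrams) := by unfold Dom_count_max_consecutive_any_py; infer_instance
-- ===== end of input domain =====

-- B decomposes the list into maximal runs of equal ngrams and takes the max of the
-- run lengths, instead of A's prev/current/max counter state machine (alternative).

-- ===== PORT A =====
-- one iteration of A's for-loop over (max_count, current_count, prev_ngram)
def pvStepA (st : Int × Int × List String) (ng : List String) : Int × Int × List String :=
  match st with
  | (mc, cc, prev) => if ng == prev then (max mc (cc + 1), cc + 1, prev) else (mc, 1, ng)

def count_max_consecutive_any_py (ngrams : List (List String)) : Int :=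
  match ngrams with
  | [] => 0
  | p :: rest => (rest.foldl pvStepA (1, 1, p)).1

-- ===== PORT B =====
-- lengths of the maximal runs of consecutive equal elements (B's outer while-loop;
-- the inner scan `while j < n and ngrams[j] == ngrams[i]` is the takeWhile)
def pvRunLens (l : List (List String)) : List Int :=
  match l with
  | [] => []
  | x :: xs =>
      ((1 : Int) + (xs.takeWhile (· == x)).length) :: pvRunLens (xs.dropWhile (· == x))
termination_by l.length
decreasing_by
  have h := List.length_dropWhile_le (fun y => y == x) xs
  simp only [List.length_cons]
  omega

-- max(run_lengths, default=0)
def count_max_consecutive_any_py_alt (ngrams : List (List String)) : Int :=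
  (pvRunLens ngrams).foldl max 0

-- ===== PRECONDITION & SPEC =====
def Spec_count_max_consecutive_any_py (ngrams : List (List String)) (out : Int) : Prop := out = count_max_consecutive_any_py_alt ngrams
instance (ngrams : List (List String)) (out : Int) : Decidable (Spec_count_max_consecutive_any_py ngrams out) := by unfold Spec_count_max_consecutive_any_py; infer_instance

-- ===== CLAIM (what is proved, stated in full; the proofs are below) =====
def Claim_equal_count_max_consecutive_any_py : Prop := ∀ (ngrams : List (List String)), Dom_count_max_consecutive_any_py ngrams → Spec_count_max_consecutive_any_py ngrams (count_max_consecutive_any_py ngrams)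

-- ===== LEMMAS AND PROOFS =====

-- foldl max pulls a max in the accumulator out front
theorem pv_foldl_max_swap (l : List Int) : ∀ a b : Int, l.foldl max (max a b) = max a (l.foldl max b) := by
  induction l with
  | nil => intro a b; rfl
  | cons x xs ih =>
      intro a b
      simp only [List.foldl_cons]
      rw [max_assoc, ih]

-- the head of a dropWhile result falsifies the predicate
theorem pv_dropWhile_head_false (p : List String → Bool) :
    ∀ (l : List (List String)) y ys, l.dropWhile p = y :: ys → p y = false := by
  intro l
  induction l with
  | nil => intro y ys h; simp [List.dropWhile] at h
  | cons a as ih =>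
      intro y ys h
      by_cases hp : p a = true
      · rw [List.dropWhile_cons_of_pos hp] at h; exact ih y ys h
      · rw [List.dropWhile_cons_of_neg hp] at h
        cases h; simpa using hp

-- A's loop over a block of elements all equal (==) to prev
theorem pv_foldl_run (prev : List String) :
    ∀ (l : List (List String)) (mc cc : Int), (∀ a ∈ l, (a == prev) = true) → cc ≤ mc →
      l.foldl pvStepA (mc, cc, prev) = (max mc (cc + l.length), cc + l.length, prev) := by
  intro l
  induction l with
  | nil =>
      intro mc cc _ hle
      simp [max_eq_left hle]
  | cons a as ih =>
      intro mc cc hall hle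
      have ha : (a == prev) = true := hall a (List.mem_cons_self ..)
      simp only [List.foldl_cons, pvStepA, ha, if_true]
      rw [ih (max mc (cc + 1)) (cc + 1) (fun b hb => hall b (List.mem_cons_of_mem _ hb))
        (le_max_right _ _)]
      have h1 : max (max mc (cc + 1)) (cc + 1 + (as.length : Int)) =
          max mc (cc + ((a :: as).length : Int)) := by
        rw [max_assoc, max_eq_right (by omega : cc + 1 ≤ cc + 1 + (as.length : Int))]
        congr 1
        push_cast [List.length_cons]
        ring
      have h2 : cc + 1 + (as.length : Int) = cc + ((a :: as).length : Int) := by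
        push_cast [List.length_cons]
        ring
      rw [h1, h2]

-- merging a fresh run length a into the max of the remaining run lengths
theorem pv_max_run_merge (D : List Int) (mc a b : Int) (ha : 0 ≤ a) (hb : 0 ≤ b) :
    max (max mc a) (List.foldl max 0 (b :: D)) = max mc (List.foldl max 0 (a :: b :: D)) := by
  simp only [List.foldl_cons]
  rw [max_eq_right ha, max_eq_right hb, pv_foldl_max_swap D a b, max_assoc]

-- the key invariant: A's loop from state (mc, cc, prev) computes the max of mc and
-- the run lengths, the first run being cc plus the leading elements equal to prev
theorem pv_key : ∀ (n : ℕ) (rest : List (List String)) (mc cc : Int) (prev : List String),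
    rest.length ≤ n → 1 ≤ cc → cc ≤ mc →
    (rest.foldl pvStepA (mc, cc, prev)).1 =
      max mc (((cc + ((rest.takeWhile (· == prev)).length : Int)) ::
        pvRunLens (rest.dropWhile (· == prev))).foldl max 0) := by
  intro n
  induction n with
  | zero =>
      intro rest mc cc prev hlen h1 hle
      have : rest = [] := List.eq_nil_of_length_eq_zero (Nat.le_zero.mp hlen)
      subst this
      simp [pvRunLens, max_eq_left hle, max_eq_right (by omega : (0:Int) ≤ cc)]
  | succ n ih =>
      intro rest mc cc prev hlen h1 hle
      have hsplit := List.takeWhile_append_dropWhile (p := (· == prev)) (l := rest)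
      have hall : ∀ a ∈ rest.takeWhile (· == prev), (a == prev) = true := by
        intro a ha
        exact List.mem_takeWhile_imp (p := fun x => x == prev) ha
      cases hdrop : rest.dropWhile (· == prev) with
      | nil =>
          have htake : rest.takeWhile (· == prev) = rest := by
            conv_rhs => rw [← hsplit]
            rw [hdrop, List.append_nil]
          have hall' : ∀ a ∈ rest, (a == prev) = true := by
            intro a ha
            refine hall a ?_
            rw [htake]
            exact ha
          rw [pv_foldl_run prev rest mc cc hall' hle, htake]
          simp only [pvRunLens, List.foldl_cons, List.foldl_nil]
          rw [max_eq_right (by omega : (0:Int) ≤ cc + rest.length)]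
      | cons y ys =>
          have hy : (y == prev) = false := pv_dropWhile_head_false _ rest y ys hdrop
          have hfold : rest.foldl pvStepA (mc, cc, prev) =
              (y :: ys).foldl pvStepA
                ((rest.takeWhile (· == prev)).foldl pvStepA (mc, cc, prev)) := by
            conv_lhs => rw [← hsplit]
            rw [List.foldl_append, hdrop]
          have hyslen : ys.length ≤ n := by
            have h2 : (rest.takeWhile (· == prev)).length +
                (rest.dropWhile (· == prev)).length = rest.length := by
              rw [← List.length_append, hsplit]
            rw [hdrop] at h2
            simp only [List.length_cons] at h2
            omega
          rw [hfold, pv_foldl_run prev _ mc cc hall hle]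
          simp only [List.foldl_cons, pvStepA, hy, Bool.false_eq_true, if_false]
          rw [ih ys (max mc (cc + ((rest.takeWhile (· == prev)).length : Int))) 1 y hyslen
            le_rfl (le_max_of_le_right (by omega))]
          rw [show pvRunLens (y :: ys) =
              ((1 : Int) + (ys.takeWhile (· == y)).length) :: pvRunLens (ys.dropWhile (· == y))
            from by rw [pvRunLens]]
          exact pv_max_run_merge _ mc _ _ (by omega) (by positivity)

-- the accumulator is a lower bound of foldl max
theorem pv_foldl_max_ge (l : List Int) : ∀ b : Int, b ≤ l.foldl max b := by
  induction l with
  | nil => intro b; exact le_refl b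
  | cons x xs ih => intro b; exact le_trans (le_max_left b x) (ih (max b x))

-- ===== VERDICT (by name: the statement is the Claim_ definition above) =====
theorem count_max_consecutive_any_py_spec : Claim_equal_count_max_consecutive_any_py := by
  intro ngrams _
  unfold Spec_count_max_consecutive_any_py count_max_consecutive_any_py count_max_consecutive_any_py_alt
  cases ngrams with
  | nil => simp [pvRunLens]
  | cons p rest =>
      show (rest.foldl pvStepA (1, 1, p)).1 = (pvRunLens (p :: rest)).foldl max 0
      rw [pv_key rest.length rest 1 1 p le_rfl le_rfl le_rfl]
      rw [show pvRunLens (p :: rest) =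
          ((1 : Int) + (rest.takeWhile (· == p)).length) :: pvRunLens (rest.dropWhile (· == p)) from by rw [pvRunLens]]
      have : (1 : Int) ≤ (((1 + ((rest.takeWhile (· == p)).length : Int)) ::
          pvRunLens (rest.dropWhile (· == p))).foldl max 0) := by
        simp only [List.foldl_cons]
        have := pv_foldl_max_ge (pvRunLens (rest.dropWhile (· == p))) (max 0 (1 + ((rest.takeWhile (· == p)).length : Int)))
        have h2 : (1:Int) ≤ max 0 (1 + ((rest.takeWhile (· == p)).length : Int)) := le_max_of_le_right (by omega)
        omega
      rw [max_eq_right this]
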